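-- pv_equiv track=rewrite | github.com/AbhinayaPinreddy/conversion-of-superteams.ai-Articles-to-md-file-and-download | converter.py | trim_markdown_tail
-- ===== SOURCE A (Python) =====
-- def trim_markdown_tail(markdown: str) -> str:
--     """
--     Remove non-article sections (e.g., "More from our Editors", newsletter CTAs)
--     that sometimes get included in the extracted container.
--     """
--     markers = [
--         "## Want to Scale Your Business with AI",
--         "## More from our Editors",
--         "## Subscribe to receive articles right in your inbox",
--     ]
--
--     authors_idx = markdown.find("## Authors")
--     search_from = authors_idx if authors_idx != -1 else 0
--
--     cut_at = None
--     for marker in markers: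
--         idx = markdown.find(marker, search_from)
--         if idx != -1 and (cut_at is None or idx < cut_at):
--             cut_at = idx
--
--     if cut_at is None:
--         return markdown
--
--     return markdown[:cut_at].rstrip() + "\n"
-- ===== SOURCE B (Python) =====
-- _MARKERS = (
--     "## Want to Scale Your Business with AI",
--     "## More from our Editors",
--     "## Subscribe to receive articles right in your inbox",
-- )
--
-- def trim_markdown_tail(markdown: str) -> str:
--     """Single left-to-right scan: cut at the first position (at or after the
--     '## Authors' heading, if present) where any marker begins."""
--     authors_idx = markdown.find("## Authors")
--     i = authors_idx if authors_idx != -1 else 0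
--     n = len(markdown)
--     while i <= n:
--         if (markdown.startswith(_MARKERS[0], i)
--                 or markdown.startswith(_MARKERS[1], i)
--                 or markdown.startswith(_MARKERS[2], i)):
--             return markdown[:i].rstrip() + "\n"
--         i += 1
--     return markdown
-- ===== Notes on version B (the rewrite author's own statement) =====
-- stated objective: alternative
-- what changed: Replaced three separate str.find scans with manual min-tracking by a single left-to-right position scan that tests all three markers at each position and cuts at the first (leftmost) match.
import Mathlib
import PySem

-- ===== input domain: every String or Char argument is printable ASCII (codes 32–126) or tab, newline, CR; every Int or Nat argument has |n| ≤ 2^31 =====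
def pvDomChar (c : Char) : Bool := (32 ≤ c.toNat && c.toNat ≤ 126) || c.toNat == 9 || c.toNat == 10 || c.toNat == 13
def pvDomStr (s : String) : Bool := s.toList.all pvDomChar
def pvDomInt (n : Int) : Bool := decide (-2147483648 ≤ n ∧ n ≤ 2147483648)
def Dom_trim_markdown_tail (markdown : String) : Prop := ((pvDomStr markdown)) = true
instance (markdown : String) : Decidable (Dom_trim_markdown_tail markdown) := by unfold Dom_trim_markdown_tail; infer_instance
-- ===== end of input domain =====

-- B replaces A's three separate find scans with manual min-tracking by a single
-- left-to-right position scan that cuts at the first position where any marker starts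
-- (objective: alternative, same result, no speed claim).


-- ===== PORT A =====
-- A's markers, in A's order
def pvMarkersA : List String :=
  ["## Want to Scale Your Business with AI",
   "## More from our Editors",
   "## Subscribe to receive articles right in your inbox"]

-- body of A's 'for marker in markers' loop: 'idx != -1 and (cut_at is None or idx < cut_at)'
def pvStepA (markdown : String) (search_from : Int) (cut_at : Option Int) (marker : String) : Option Int :=
  let idx := PySem.Str.findFrom markdown marker search_from
  if idx = -1 then cut_at
  else match cut_at with
    | none => some idx
    | some c => if idx < c then some idx else cut_at

def trim_markdown_tail (markdown : String) : String :=
  let authors_idx := PySem.Str.find markdown "## Authors"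
  let search_from : Int := if authors_idx ≠ -1 then authors_idx else 0
  let cut_at : Option Int := pvMarkersA.foldl (pvStepA markdown search_from) none
  match cut_at with
  | none => markdown
  | some c => PySem.Str.rstrip (PySem.Str.slice markdown none (some c)) ++ "\n"

-- ===== PORT B =====
def pvM1 : List Char := "## Want to Scale Your Business with AI".toList
def pvM2 : List Char := "## More from our Editors".toList
def pvM3 : List Char := "## Subscribe to receive articles right in your inbox".toList

-- Source B's or-chain of the three 'markdown.startswith(marker, i)' tests
def pvMatch (cs : List Char) (i : Nat) : Bool :=
  PySem.Chars.startswith (cs.drop i) pvM1 || PySem.Chars.startswith (cs.drop i) pvM2 ||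
    PySem.Chars.startswith (cs.drop i) pvM3

-- Source B's 'while i <= n' scan
def pvScan (cs : List Char) (i : Nat) : Option Nat :=
  if _h : cs.length < i then none
  else if pvMatch cs i then some i
  else pvScan cs (i + 1)
termination_by cs.length + 1 - i
decreasing_by omega

def trim_markdown_tail_alt (markdown : String) : String :=
  let cs := markdown.toList
  let authors_idx := PySem.Chars.find cs "## Authors".toList
  let i0 : Nat := if authors_idx ≠ -1 then authors_idx.toNat else 0
  match pvScan cs i0 with
  | some i => String.ofList (PySem.Chars.rstrip (cs.take i)) ++ "\n"
  | none => markdown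

-- ===== PRECONDITION & SPEC =====
def Spec_trim_markdown_tail (markdown : String) (out : String) : Prop := out = trim_markdown_tail_alt markdown
instance (markdown : String) (out : String) : Decidable (Spec_trim_markdown_tail markdown out) := by unfold Spec_trim_markdown_tail; infer_instance

-- ===== CLAIM (what is proved, stated in full; the proofs are below) =====
def Claim_equal_trim_markdown_tail : Prop := ∀ (markdown : String), Dom_trim_markdown_tail markdown → Spec_trim_markdown_tail markdown (trim_markdown_tail markdown)

-- ===== LEMMAS AND PROOFS =====

theorem pvMatch_of_len (cs : List Char) (j : Nat) (h : cs.length ≤ j) : pvMatch cs j = false := by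
  have hd : cs.drop j = [] := List.drop_eq_nil_of_le h
  simp only [pvMatch, hd]
  decide

-- characterization of B's scan: 'none' means no position at or after i matches
theorem pvScan_eq_none_iff (cs : List Char) (i : Nat) :
    pvScan cs i = none ↔ ∀ j, i ≤ j → pvMatch cs j = false := by
  fun_induction pvScan cs i with
  | case1 i h =>
      simp only [true_iff]
      intro j hj; exact pvMatch_of_len cs j (by omega)
  | case2 i h hm =>
      simp only [reduceCtorEq, false_iff]
      intro hall
      have := hall i (le_refl i)
      simp [hm] at this
  | case3 i h hm ih =>
      rw [ih]
      constructor
      · intro hall j hj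
        rcases Nat.eq_or_lt_of_le hj with rfl | hlt
        · simpa using hm
        · exact hall j (by omega)
      · intro hall j hj; exact hall j (by omega)

-- characterization of B's scan: 'some c' is the first matching position at or after i
theorem pvScan_eq_some_iff (cs : List Char) (i c : Nat) :
    pvScan cs i = some c ↔ i ≤ c ∧ pvMatch cs c = true ∧ ∀ j, i ≤ j → j < c → pvMatch cs j = false := by
  fun_induction pvScan cs i with
  | case1 i h =>
      simp only [reduceCtorEq, false_iff]
      intro ⟨h1, h2, _⟩
      have := pvMatch_of_len cs c (by omega)
      simp [this] at h2
  | case2 i h hm =>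
      constructor
      · rintro ⟨rfl⟩; exact ⟨le_refl _, hm, by omega⟩
      · rintro ⟨h1, h2, h3⟩
        rcases Nat.eq_or_lt_of_le h1 with rfl | hlt
        · rfl
        · have := h3 i (le_refl _) hlt; simp [hm] at this
  | case3 i h hm ih =>
      rw [ih]
      constructor
      · rintro ⟨h1, h2, h3⟩
        refine ⟨by omega, h2, ?_⟩
        intro j hj hjc
        rcases Nat.eq_or_lt_of_le hj with rfl | hlt
        · simpa using hm
        · exact h3 j (by omega) hjc
      · rintro ⟨h1, h2, h3⟩
        have hic : i ≠ c := by rintro rfl; simp [hm] at h2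
        exact ⟨by omega, h2, fun j hj hjc => h3 j (by omega) hjc⟩

-- invariant carried through A's fold over the markers: the accumulator is none iff no
-- processed marker occurs at or after s, else the least such occurrence position
def pvInv (cs : List Char) (s : Nat) (done : List (List Char)) (acc : Option Int) : Prop :=
  (acc = none ∧ ∀ m ∈ done, ∀ j, s ≤ j → ¬ m <+: cs.drop j)
  ∨ (∃ c : Nat, acc = some (c : Int) ∧ s ≤ c ∧ c ≤ cs.length ∧ (∃ m ∈ done, m <+: cs.drop c) ∧
      ∀ m ∈ done, ∀ j, s ≤ j → j < c → ¬ m <+: cs.drop j)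

theorem pvStepA_unfold (markdown : String) (sf : Int) (acc : Option Int) (marker : String) :
    pvStepA markdown sf acc marker =
      (if PySem.Chars.findFrom markdown.toList marker.toList sf = -1 then acc
       else match acc with
         | none => some (PySem.Chars.findFrom markdown.toList marker.toList sf)
         | some c => if PySem.Chars.findFrom markdown.toList marker.toList sf < c then
             some (PySem.Chars.findFrom markdown.toList marker.toList sf) else acc) := by
  simp [pvStepA]

theorem pvStepA_inv (markdown : String) (s : Nat) (hs : s ≤ markdown.toList.length)
    (done : List (List Char)) (acc : Option Int) (marker : String) (hm : marker.toList ≠ [])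
    (h : pvInv markdown.toList s done acc) :
    pvInv markdown.toList s (done ++ [marker.toList]) (pvStepA markdown (s : Int) acc marker) := by
  rw [pvStepA_unfold]
  by_cases hf : PySem.Chars.findFrom markdown.toList marker.toList (s : Int) = -1
  · have habs : ¬ marker.toList <:+: (markdown.toList).drop s :=
      (PySem.Chars.findFrom_natCast_eq_neg_one_iff markdown.toList marker.toList s hs).mp hf
    have hno : ∀ j, s ≤ j → ¬ marker.toList <+: (markdown.toList).drop j := by
      intro j hj hpre
      apply habs
      rw [← PySem.Chars.isIn_iff_infix, ← PySem.Chars.exists_prefix_drop_iff_isIn]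
      refine ⟨j - s, ?_⟩
      rw [List.drop_drop]
      have hj' : s + (j - s) = j := by omega
      rwa [hj']
    rw [if_pos hf]
    rcases h with ⟨hacc, hall⟩ | ⟨c, hacc, h1, h2, h3, h4⟩
    · left
      refine ⟨hacc, ?_⟩
      intro m hmem
      rcases List.mem_append.mp hmem with hmem | hmem
      · exact hall m hmem
      · simp at hmem; subst hmem; exact hno
    · right
      refine ⟨c, hacc, h1, h2, ?_, ?_⟩
      · rcases h3 with ⟨m, hmem, hp⟩; exact ⟨m, List.mem_append.mpr (Or.inl hmem), hp⟩
      · intro m hmem j hj hjc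
        rcases List.mem_append.mp hmem with hmem | hmem
        · exact h4 m hmem j hj hjc
        · simp at hmem; subst hmem; exact hno j hj
  · obtain ⟨hle, hpre, hmin⟩ := PySem.Chars.findFrom_natCast_spec markdown.toList marker.toList s hs hf
    rw [if_neg hf]
    set f := PySem.Chars.findFrom markdown.toList marker.toList (s : Int) with hfdef
    have hf0 : 0 ≤ f := le_trans (by positivity) hle
    have hfc : ((f.toNat : Nat) : Int) = f := Int.toNat_of_nonneg hf0
    have hsf : s ≤ f.toNat := by omega
    have hflen : f.toNat ≤ (markdown.toList).length := by
      by_contra hc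
      have hnil : (markdown.toList).drop f.toNat = [] := List.drop_eq_nil_of_le (by omega)
      rw [hnil] at hpre
      exact hm (List.prefix_nil.mp hpre)
    rcases h with ⟨hacc, hall⟩ | ⟨c, hacc, h1, h2, h3, h4⟩
    · rw [hacc]
      right
      refine ⟨f.toNat, by rw [hfc], hsf, hflen, ⟨marker.toList, by simp, hpre⟩, ?_⟩
      intro m hmem j hj hjc
      rcases List.mem_append.mp hmem with hmem | hmem
      · exact hall m hmem j hj
      · simp at hmem; subst hmem; exact hmin j hj hjc
    · rw [hacc]
      have hred : (match (some (c : Int) : Option Int) with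
          | none => some f
          | some c1 => if f < c1 then some f else some (c : Int)) =
          (if f < (c : Int) then some f else some (c : Int)) := rfl
      rw [hred]
      by_cases hlt : f < (c : Int)
      · rw [if_pos hlt]
        right
        have hcc : f.toNat < c := by omega
        refine ⟨f.toNat, by rw [hfc], hsf, hflen, ⟨marker.toList, by simp, hpre⟩, ?_⟩
        intro m hmem j hj hjc
        rcases List.mem_append.mp hmem with hmem | hmem
        · exact h4 m hmem j hj (by omega)
        · simp at hmem; subst hmem; exact hmin j hj hjc
      · rw [if_neg hlt]
        right
        have hcf : c ≤ f.toNat := by omega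
        refine ⟨c, rfl, h1, h2, ?_, ?_⟩
        · rcases h3 with ⟨m, hmem, hp⟩; exact ⟨m, List.mem_append.mpr (Or.inl hmem), hp⟩
        · intro m hmem j hj hjc
          rcases List.mem_append.mp hmem with hmem | hmem
          · exact h4 m hmem j hj hjc
          · simp at hmem; subst hmem; exact hmin j hj (by omega)

theorem pvMatch_false_of (cs : List Char) (j : Nat) (h1 : ¬ pvM1 <+: cs.drop j)
    (h2 : ¬ pvM2 <+: cs.drop j) (h3 : ¬ pvM3 <+: cs.drop j) : pvMatch cs j = false := by
  rw [Bool.eq_false_iff]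
  intro h
  simp only [pvMatch, Bool.or_eq_true, PySem.Chars.startswith_iff] at h
  rcases h with (h | h) | h
  exacts [h1 h, h2 h, h3 h]

theorem pvMatch_true_of (cs : List Char) (j : Nat) (m : List Char)
    (hmem : m ∈ [pvM1, pvM2, pvM3]) (hp : m <+: cs.drop j) : pvMatch cs j = true := by
  simp only [List.mem_cons, List.not_mem_nil, or_false] at hmem
  rcases hmem with rfl | rfl | rfl <;>
    simp [pvMatch, PySem.Chars.startswith_iff, hp]

theorem trim_markdown_tail_spec' (markdown : String) :
    trim_markdown_tail markdown = trim_markdown_tail_alt markdown := by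
  have hfind : PySem.Str.find markdown "## Authors" = PySem.Chars.find markdown.toList "## Authors".toList := by
    simp
  have ha1 : -1 ≤ PySem.Chars.find markdown.toList "## Authors".toList :=
    PySem.Chars.neg_one_le_find _ _
  have ha2 : PySem.Chars.find markdown.toList "## Authors".toList ≤ (markdown.toList.length : Int) :=
    PySem.Chars.find_le_length _ _
  set a := PySem.Chars.find markdown.toList "## Authors".toList with hadef
  set s : Nat := if a ≠ -1 then a.toNat else 0 with hsdef
  have hcast : (if a ≠ -1 then a else 0) = (s : Int) := by
    by_cases h : a = -1
    · simp [hsdef, h]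
    · simp only [hsdef, h, ne_eq, not_false_iff, if_true]
      omega
  have hs : s ≤ markdown.toList.length := by
    by_cases h : a = -1
    · simp [hsdef, h]
    · simp only [hsdef, h, ne_eq, not_false_iff, if_true]
      omega
  have hA : trim_markdown_tail markdown =
      (match pvMarkersA.foldl (pvStepA markdown (s : Int)) none with
       | none => markdown
       | some c => PySem.Str.rstrip (PySem.Str.slice markdown none (some c)) ++ "\n") := by
    rw [trim_markdown_tail]
    rw [hfind, hcast]
  have hB : trim_markdown_tail_alt markdown =
      (match pvScan markdown.toList s with
       | some i => String.ofList (PySem.Chars.rstrip (markdown.toList.take i)) ++ "\n"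
       | none => markdown) := by
    rw [trim_markdown_tail_alt]
  rw [hA, hB]
  have h0 : pvInv markdown.toList s [] none := Or.inl ⟨rfl, by simp⟩
  have h1 := pvStepA_inv markdown s hs [] none "## Want to Scale Your Business with AI" (by decide) h0
  have h2 := pvStepA_inv markdown s hs _ _ "## More from our Editors" (by decide) h1
  have h3 := pvStepA_inv markdown s hs _ _ "## Subscribe to receive articles right in your inbox" (by decide) h2
  have hinv : pvInv markdown.toList s [pvM1, pvM2, pvM3]
      (pvMarkersA.foldl (pvStepA markdown (s : Int)) none) := by
    simpa [pvMarkersA, List.foldl, pvM1, pvM2, pvM3] using h3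
  rcases hinv with ⟨hacc, hall⟩ | ⟨c, hacc, h1c, h2c, ⟨m, hmem, hp⟩, h4c⟩
  · rw [hacc]
    have hscan : pvScan markdown.toList s = none := by
      rw [pvScan_eq_none_iff]
      intro j hj
      exact pvMatch_false_of _ _ (hall pvM1 (by simp) j hj) (hall pvM2 (by simp) j hj)
        (hall pvM3 (by simp) j hj)
    rw [hscan]
  · rw [hacc]
    have hscan : pvScan markdown.toList s = some c := by
      rw [pvScan_eq_some_iff]
      refine ⟨h1c, pvMatch_true_of _ _ m hmem hp, ?_⟩
      intro j hj hjc
      exact pvMatch_false_of _ _ (h4c pvM1 (by simp) j hj hjc) (h4c pvM2 (by simp) j hj hjc)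
        (h4c pvM3 (by simp) j hj hjc)
    rw [hscan]
    rw [← String.toList_inj]
    simp only [String.toList_append, PySem.Str.toList_rstrip, PySem.Str.toList_slice,
      PySem.Chars.slice_eq_listSlice]
    rw [PySem.List.slice_to _ (by positivity)]
    simp

-- ===== VERDICT (by name: the statement is the Claim_ definition above) =====
theorem trim_markdown_tail_spec : Claim_equal_trim_markdown_tail := by
  intro markdown _
  exact trim_markdown_tail_spec' markdown
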